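-- pv_equiv track=rewrite | github.com/klbarrus/cryptopals-python | cpals.py | score_string
-- ===== SOURCE A (Python) =====
-- def score_string(s):
--     score = 0
--     for x in s:
--         xo = chr(x)
--         if 'a' <= xo <= 'z':
--             score += 1
--         elif 'A' <= xo <= 'Z':
--             score += 1
--
--         if xo == 'E' or xo == 'e' or \
--            xo == 'T' or xo == 't' or \
--            xo == 'A' or xo == 'a' or \
--            xo == 'O' or xo == 'o' or \
--            xo == 'I' or xo == 'i' or \
--            xo == 'N' or xo == 'n' or \
--            xo == 'S' or xo == 's' or \
--            xo == 'H' or xo == 'h' or \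
--            xo == 'R' or xo == 'r' or \
--            xo == 'D' or xo == 'd' or \
--            xo == 'L' or xo == 'l' or \
--            xo == 'U' or xo == 'u' or \
--            xo == ' ':
--             score += 9
--     return score
-- ===== SOURCE B (Python) =====
-- def score_string(s):
--     counts = {}
--     for x in s:
--         counts[x] = counts.get(x, 0) + 1
--     common = {69, 101, 84, 116, 65, 97, 79, 111, 73, 105, 78, 110,
--               83, 115, 72, 104, 82, 114, 68, 100, 76, 108, 85, 117, 32}
--     total = 0
--     for b, c in counts.items():
--         w = 1 if (97 <= b <= 122 or 65 <= b <= 90) else 0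
--         if b in common:
--             w += 9
--         total += c * w
--     return total
-- ===== Notes on version B (the rewrite author's own statement) =====
-- stated objective: alternative
-- what changed: B tallies byte frequencies into a dict in one pass and then sums count*weight over the distinct byte values with a single weight table (letter +1, common/space +9), replacing A's per-byte chr() call and 25-way branch chain with per-distinct-key work.
import Mathlib
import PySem

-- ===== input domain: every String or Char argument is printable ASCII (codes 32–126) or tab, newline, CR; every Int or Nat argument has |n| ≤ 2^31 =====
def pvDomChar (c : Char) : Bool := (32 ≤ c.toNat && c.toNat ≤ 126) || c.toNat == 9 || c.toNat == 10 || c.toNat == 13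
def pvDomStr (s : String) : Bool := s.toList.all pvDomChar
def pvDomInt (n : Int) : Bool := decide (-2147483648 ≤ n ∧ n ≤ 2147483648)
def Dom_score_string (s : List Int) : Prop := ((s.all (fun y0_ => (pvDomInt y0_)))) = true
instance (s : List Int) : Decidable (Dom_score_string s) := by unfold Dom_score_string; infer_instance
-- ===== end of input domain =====

-- B replaces A's per-element branch chain by a frequency dict built in one pass plus a
-- count*weight sum over the distinct codes; equal on all inputs where A's chr() succeeds.

-- ===== PORT A =====
-- chr(x) succeeds under Pre_; Python's char comparisons/equalities on the result are
-- exactly code-point comparisons on x, ported as such (exact under Pre_score_string).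
def score_string (s : List Int) : Int :=
  s.foldl (fun score x =>
    let score := if 97 ≤ x ∧ x ≤ 122 then score + 1
      else if 65 ≤ x ∧ x ≤ 90 then score + 1 else score
    if x = 69 ∨ x = 101 ∨ x = 84 ∨ x = 116 ∨ x = 65 ∨ x = 97 ∨ x = 79 ∨ x = 111 ∨
       x = 73 ∨ x = 105 ∨ x = 78 ∨ x = 110 ∨ x = 83 ∨ x = 115 ∨ x = 72 ∨ x = 104 ∨
       x = 82 ∨ x = 114 ∨ x = 68 ∨ x = 100 ∨ x = 76 ∨ x = 108 ∨ x = 85 ∨ x = 117 ∨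
       x = 32 then score + 9 else score) 0

-- ===== PORT B =====
def bCommon : List Int :=
  [69, 101, 84, 116, 65, 97, 79, 111, 73, 105, 78, 110,
   83, 115, 72, 104, 82, 114, 68, 100, 76, 108, 85, 117, 32]

def score_string_alt (s : List Int) : Int :=
  let counts := s.foldl (fun d x => d.insert x (d.getD x 0 + 1)) (PySem.Dict.empty)
  counts.items.foldl (fun total bc =>
    let w : Int := if (97 ≤ bc.1 ∧ bc.1 ≤ 122) ∨ (65 ≤ bc.1 ∧ bc.1 ≤ 90) then 1 else 0
    let w := if bc.1 ∈ bCommon then w + 9 else w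
    total + bc.2 * w) 0

-- ===== PRECONDITION & SPEC =====
-- Pre_ excludes exactly the inputs on which A's chr(x) raises ValueError (x < 0 or x > 0x10FFFF).
def Pre_score_string (s : List Int) : Prop := ∀ x ∈ s, 0 ≤ x ∧ x ≤ 1114111
instance (s : List Int) : Decidable (Pre_score_string s) := by unfold Pre_score_string; infer_instance
def pvWitness_score_string : List Int := [104, 105, 32, 33]

def Spec_score_string (s : List Int) (out : Int) : Prop := out = score_string_alt s
instance (s : List Int) (out : Int) : Decidable (Spec_score_string s out) := by unfold Spec_score_string; infer_instance

-- ===== CLAIM (what is proved, stated in full; the proofs are below) =====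
def Claim_equal_score_string : Prop := ∀ (s : List Int), Dom_score_string s → Pre_score_string s → Spec_score_string s (score_string s)

-- ===== LEMMAS AND PROOFS =====

-- the common per-code weight both programs realise
def pvW (x : Int) : Int :=
  (if (97 ≤ x ∧ x ≤ 122) ∨ (65 ≤ x ∧ x ≤ 90) then 1 else 0) +
  (if x ∈ bCommon then 9 else 0)

lemma foldlA (s : List Int) (a : Int) :
    s.foldl (fun score x =>
      let score := if 97 ≤ x ∧ x ≤ 122 then score + 1
        else if 65 ≤ x ∧ x ≤ 90 then score + 1 else score
      if x = 69 ∨ x = 101 ∨ x = 84 ∨ x = 116 ∨ x = 65 ∨ x = 97 ∨ x = 79 ∨ x = 111 ∨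
         x = 73 ∨ x = 105 ∨ x = 78 ∨ x = 110 ∨ x = 83 ∨ x = 115 ∨ x = 72 ∨ x = 104 ∨
         x = 82 ∨ x = 114 ∨ x = 68 ∨ x = 100 ∨ x = 76 ∨ x = 108 ∨ x = 85 ∨ x = 117 ∨
         x = 32 then score + 9 else score) a = a + (s.map pvW).sum := by
  induction s generalizing a with
  | nil => simp
  | cons x t ih =>
    rw [List.foldl_cons, ih, List.map_cons, List.sum_cons]
    have hstep : (let score := if 97 ≤ x ∧ x ≤ 122 then a + 1
        else if 65 ≤ x ∧ x ≤ 90 then a + 1 else a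
      if x = 69 ∨ x = 101 ∨ x = 84 ∨ x = 116 ∨ x = 65 ∨ x = 97 ∨ x = 79 ∨ x = 111 ∨
         x = 73 ∨ x = 105 ∨ x = 78 ∨ x = 110 ∨ x = 83 ∨ x = 115 ∨ x = 72 ∨ x = 104 ∨
         x = 82 ∨ x = 114 ∨ x = 68 ∨ x = 100 ∨ x = 76 ∨ x = 108 ∨ x = 85 ∨ x = 117 ∨
         x = 32 then score + 9 else score) = a + pvW x := by
      simp only [pvW, bCommon, List.mem_cons, List.not_mem_nil, or_false]
      split_ifs <;> omega
    rw [hstep]; ring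

lemma foldlB (l : List (Int × Int)) (a : Int) :
    l.foldl (fun total bc =>
      let w : Int := if (97 ≤ bc.1 ∧ bc.1 ≤ 122) ∨ (65 ≤ bc.1 ∧ bc.1 ≤ 90) then 1 else 0
      let w := if bc.1 ∈ bCommon then w + 9 else w
      total + bc.2 * w) a = a + (l.map (fun bc => bc.2 * pvW bc.1)).sum := by
  induction l generalizing a with
  | nil => simp
  | cons p t ih =>
    rw [List.foldl_cons, ih, List.map_cons, List.sum_cons]
    have hstep : (let w : Int := if (97 ≤ p.1 ∧ p.1 ≤ 122) ∨ (65 ≤ p.1 ∧ p.1 ≤ 90) then 1 else 0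
        let w := if p.1 ∈ bCommon then w + 9 else w
        a + p.2 * w) = a + p.2 * pvW p.1 := by
      simp only [pvW]; split_ifs <;> ring
    rw [hstep]; ring

-- Σ over a nodup list containing x of (if k = x then 1 else 0) * w k = w x
lemma sum_single (u : List Int) (x : Int) (hu : u.Nodup) (hx : x ∈ u) :
    (u.map (fun k => (if x = k then (1 : Int) else 0) * pvW k)).sum = pvW x := by
  induction u with
  | nil => simp at hx
  | cons y t ih =>
    rcases List.mem_cons.mp hx with h | h
    · subst h
      have hz : (t.map (fun k => (if x = k then (1 : Int) else 0) * pvW k)).sum = 0 := by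
        apply List.sum_eq_zero
        intro z hz
        rcases List.mem_map.mp hz with ⟨k, hk, rfl⟩
        have hne : x ≠ k := fun h => (List.nodup_cons.mp hu).1 (h ▸ hk)
        simp [hne]
      rw [List.map_cons, List.sum_cons, hz, if_pos rfl]; ring
    · have hne : x ≠ y := fun he => (List.nodup_cons.mp hu).1 (he ▸ h)
      simp only [List.map_cons, List.sum_cons, if_neg hne, zero_mul, zero_add]
      exact ih (List.nodup_cons.mp hu).2 h

-- core: count*weight over distinct codes = weight-sum over the list
lemma count_weight_sum (s u : List Int) (hu : u.Nodup) (hcov : ∀ y ∈ s, y ∈ u) :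
    (u.map (fun k => ((s.count k : Nat) : Int) * pvW k)).sum = (s.map pvW).sum := by
  induction s with
  | nil => simp
  | cons x t ih =>
    have hcovt : ∀ y ∈ t, y ∈ u := fun y hy => hcov y (List.mem_cons_of_mem _ hy)
    have hsplit : ∀ k ∈ u, (((x :: t).count k : Nat) : Int) * pvW k =
        ((t.count k : Nat) : Int) * pvW k + (if x = k then (1 : Int) else 0) * pvW k := by
      intro k _
      by_cases h : x = k
      · subst h; rw [List.count_cons_self, if_pos rfl]; push_cast; ring
      · rw [List.count_cons]; simp [h]
    rw [List.map_congr_left hsplit, PySem.List.sum_map_add_int, ih hcovt,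
        sum_single u x hu (hcov x (List.mem_cons_self)), List.map_cons, List.sum_cons]
    ring

-- ===== VERDICT (by name: the statement is the Claim_ definition above) =====
theorem score_string_spec : Claim_equal_score_string := by
  intro s _ _
  unfold Spec_score_string score_string score_string_alt
  rw [foldlA, PySem.Dict.foldl_insert_getD_add_one_eq_counter, foldlB,
      PySem.Dict.items_counter]
  rw [List.map_map]
  have := count_weight_sum s (PySem.Set.ofList s) (PySem.Set.nodup_ofList s)
      (fun y hy => (PySem.Set.mem_ofList s y).mpr hy)
  simp only [Function.comp_def] at this ⊢
  omega
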